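-- pv_equiv track=rewrite | github.com/renzon/code_interview_training | old/turtle.py | path_iterator
-- ===== SOURCE A (Python) =====
-- from itertools import cycle
--
-- def path_iterator(path):
--     line = [0, 0, 0, 0]
--     directions = cycle(['North', 'East', 'South', 'West'])
--     for length in path:
--         direction = next(directions)
--         line[0] = line[2]
--         line[1] = line[3]
--         if direction == 'North':
--             line[3] += length
--             yield list(line)
--         elif direction == 'South':
--             line[3] -= length
--             yield list(line)
--         elif direction == 'East':
--             line[2] += length
--             yield list(line)
--         else:
--             line[2] -= length
--             yield list(line)
-- ===== SOURCE B (Python) =====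
-- from itertools import accumulate
--
-- def path_iterator(path):
--     # staged pipeline: sign the lengths, turn them into axis displacements,
--     # prefix-sum into the list of visited points, then pair consecutive points
--     signed = [l if i % 4 < 2 else -l for i, l in enumerate(path)]
--     disps = [(0, s) if i % 2 == 0 else (s, 0) for i, s in enumerate(signed)]
--     points = list(accumulate(disps, lambda p, d: (p[0] + d[0], p[1] + d[1]),
--                              initial=(0, 0)))
--     for (x, y), (nx, ny) in zip(points, points[1:]):
--         yield [x, y, nx, ny]
-- ===== Notes on version B (the rewrite author's own statement) =====
-- stated objective: alternative
-- what changed: Replaces the single-pass mutable-line loop with string-direction dispatch by a staged pipeline: sign the lengths by index, map them to axis displacements, prefix-sum (accumulate) them into the list of visited points, and pair consecutive points into segments.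
import Mathlib
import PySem

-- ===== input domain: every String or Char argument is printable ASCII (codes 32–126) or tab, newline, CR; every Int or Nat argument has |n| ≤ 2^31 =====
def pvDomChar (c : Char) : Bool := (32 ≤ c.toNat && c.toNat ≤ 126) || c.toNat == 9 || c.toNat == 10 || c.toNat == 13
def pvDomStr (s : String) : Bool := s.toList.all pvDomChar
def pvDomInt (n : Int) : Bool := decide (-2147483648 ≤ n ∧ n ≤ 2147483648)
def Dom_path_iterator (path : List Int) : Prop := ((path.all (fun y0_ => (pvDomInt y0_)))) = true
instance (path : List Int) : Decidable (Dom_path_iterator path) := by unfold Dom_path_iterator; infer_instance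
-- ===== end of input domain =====

-- B replaces A's single-pass mutable-line loop with string dispatch by a staged
-- pipeline (sign lengths, map to displacements, prefix-sum into points, pair
-- consecutive points); alternative decomposition, same cost.

-- ===== PORT A =====
-- itertools.cycle over the four strings is ported as an index i advanced each
-- iteration and read modulo 4 (exact: cycle repeats the list forever).
def pvDirsA : List String := ["North", "East", "South", "West"]

-- line = [l0, l1, l2, l3]; each step sets line[0]:=line[2], line[1]:=line[3],
-- then branches on the direction string, yielding a copy of line.
def pvGoA (i : Nat) (line : Int × Int × Int × Int) : List Int → List (List Int)
  | [] => []
  | len :: rest =>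
    let direction := pvDirsA[i % 4]!
    let l0 := line.2.2.1
    let l1 := line.2.2.2
    if direction = "North" then
      let line' := (l0, l1, line.2.2.1, line.2.2.2 + len)
      [l0, l1, line'.2.2.1, line'.2.2.2] :: pvGoA (i + 1) line' rest
    else if direction = "South" then
      let line' := (l0, l1, line.2.2.1, line.2.2.2 - len)
      [l0, l1, line'.2.2.1, line'.2.2.2] :: pvGoA (i + 1) line' rest
    else if direction = "East" then
      let line' := (l0, l1, line.2.2.1 + len, line.2.2.2)
      [l0, l1, line'.2.2.1, line'.2.2.2] :: pvGoA (i + 1) line' rest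
    else
      let line' := (l0, l1, line.2.2.1 - len, line.2.2.2)
      [l0, l1, line'.2.2.1, line'.2.2.2] :: pvGoA (i + 1) line' rest

def path_iterator (path : List Int) : List (List Int) :=
  pvGoA 0 (0, 0, 0, 0) path

-- ===== PORT B =====
-- Source B's staged comprehensions: enumerate → List.zipIdx (Lean pairs (value, index)),
-- itertools.accumulate with initial → List.scanl, zip(points, points[1:]) → zip with tail.
def path_iterator_alt (path : List Int) : List (List Int) :=
  let signed := (path.zipIdx).map (fun p => if p.2 % 4 < 2 then p.1 else -p.1)
  let disps := (signed.zipIdx).map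
    (fun p => if p.2 % 2 == 0 then ((0 : Int), p.1) else (p.1, (0 : Int)))
  let points := disps.scanl (fun p d => (p.1 + d.1, p.2 + d.2)) ((0 : Int), (0 : Int))
  (points.zip points.tail).map (fun q => [q.1.1, q.1.2, q.2.1, q.2.2])

-- ===== PRECONDITION & SPEC =====
def Spec_path_iterator (path : List Int) (out : List (List Int)) : Prop := out = path_iterator_alt path
instance (path : List Int) (out : List (List Int)) : Decidable (Spec_path_iterator path out) := by unfold Spec_path_iterator; infer_instance

-- ===== CLAIM (what is proved, stated in full; the proofs are below) =====
def Claim_equal_path_iterator : Prop := ∀ (path : List Int), Dom_path_iterator path → Spec_path_iterator path (path_iterator path)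

-- ===== LEMMAS AND PROOFS =====

-- proof helpers: the "pair consecutive scanl points into segments" stage
def pvStep (p d : Int × Int) : Int × Int := (p.1 + d.1, p.2 + d.2)

def pvSegs (p : Int × Int) (ds : List (Int × Int)) : List (List Int) :=
  ((ds.scanl pvStep p).zip (ds.scanl pvStep p).tail).map
    (fun q => [q.1.1, q.1.2, q.2.1, q.2.2])

theorem pvSegs_cons (p d : Int × Int) (ds : List (Int × Int)) :
    pvSegs p (d :: ds)
      = [p.1, p.2, p.1 + d.1, p.2 + d.2] :: pvSegs (pvStep p d) ds := by
  cases ds <;> simp [pvSegs, pvStep, List.scanl_cons]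

-- B's pipeline generalized to start index i and start point (x, y); A's first
-- two line components are overwritten before use, so only (x, y) matters.
theorem pvPipe_eq_pvGoA (path : List Int) : ∀ (i : Nat) (a b x y : Int),
    pvSegs (x, y)
      ((((path.zipIdx i).map (fun p => if p.2 % 4 < 2 then p.1 else -p.1)).zipIdx i).map
        (fun p => if p.2 % 2 == 0 then ((0 : Int), p.1) else (p.1, (0 : Int))))
    = pvGoA i (a, b, x, y) path := by
  induction path with
  | nil => intro i a b x y; rfl
  | cons len rest ih =>
    intro i a b x y
    have h4 : i % 4 = 0 ∨ i % 4 = 1 ∨ i % 4 = 2 ∨ i % 4 = 3 := by omega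
    rcases h4 with h | h | h | h <;>
      have h2 : i % 2 = i % 4 % 2 := (Nat.mod_mod_of_dvd i (by norm_num)).symm <;>
      simp [pvGoA, pvDirsA, List.zipIdx_cons, pvSegs_cons, pvStep, h, h2,
        sub_eq_add_neg] <;>
      simpa using ih (i + 1) x y _ _

-- ===== VERDICT (by name: the statement is the Claim_ definition above) =====
theorem path_iterator_spec : Claim_equal_path_iterator := by
  intro path _
  unfold Spec_path_iterator
  show pvGoA 0 (0, 0, 0, 0) path = _
  rw [← pvPipe_eq_pvGoA path 0 0 0 0 0]
  rfl
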